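-- pv_equiv track=rewrite | github.com/Isabella136/deeparg-ismb-2026 | real_data_test/distribution_analysis/differential_distribution_visualization.py | sorted_domains_combo
-- ===== SOURCE A (Python) =====
-- def sorted_domains_combo(dom_list: list[str]) -> list[str]:
--     if len(dom_list) == 1: return dom_list
--     first_dom = dom_list[0]
--     recursive_combo_list = sorted_domains_combo(dom_list[1:])
--     extended_combo_list = [
--         "$".join((first_dom, curr_combo)) for curr_combo in recursive_combo_list]
--     extended_combo_list.append(first_dom)
--     extended_combo_list.extend(recursive_combo_list)
--     return extended_combo_list
-- ===== SOURCE B (Python) =====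
-- def sorted_domains_combo(dom_list: list[str]) -> list[str]:
--     n = len(dom_list)
--     return [
--         "$".join(d for i, d in enumerate(dom_list) if (mask // 2 ** (n - 1 - i)) % 2)
--         for mask in reversed(range(1, 2 ** n))
--     ]
-- ===== Notes on version B (the rewrite author's own statement) =====
-- stated objective: alternative
-- what changed: Replaces A's head-recursion on the list by direct bitmask enumeration: each output line is read off the binary digits of a counter running from 2^n-1 down to 1, with no recursion at all.
import Mathlib
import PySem

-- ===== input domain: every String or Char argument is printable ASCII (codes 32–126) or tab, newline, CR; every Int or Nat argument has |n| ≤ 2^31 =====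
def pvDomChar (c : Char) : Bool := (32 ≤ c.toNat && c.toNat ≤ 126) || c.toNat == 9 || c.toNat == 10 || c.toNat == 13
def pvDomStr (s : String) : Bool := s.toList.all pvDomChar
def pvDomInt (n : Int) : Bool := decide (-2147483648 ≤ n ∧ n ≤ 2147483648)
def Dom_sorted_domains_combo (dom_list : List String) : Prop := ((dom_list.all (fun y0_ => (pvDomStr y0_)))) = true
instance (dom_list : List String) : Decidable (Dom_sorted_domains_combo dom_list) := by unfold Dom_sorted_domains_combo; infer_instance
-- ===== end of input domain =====

-- B replaces A's recursion on the list by bitmask enumeration (a counter from 2^n-1 down to 1); same values, no speed claim.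

-- ===== PORT A =====
-- "$".join((first_dom, curr_combo)) on a 2-tuple is exactly first_dom ++ "$" ++ curr_combo
def sorted_domains_combo (dom_list : List String) : List String :=
  match dom_list with
  | [] => []          -- Python raises IndexError at dom_list[0] here; excluded by Pre_
  | [x] => [x]
  | first_dom :: rest =>
    let recursive_combo_list := sorted_domains_combo rest
    (recursive_combo_list.map (fun curr_combo => first_dom ++ "$" ++ curr_combo))
      ++ [first_dom] ++ recursive_combo_list

-- ===== PORT B =====
-- Source B: one comprehension over mask in reversed(range(1, 2**n)); the inner generator keeps
-- dom_list[i] iff (mask // 2**(n-1-i)) % 2 is truthy (nonzero).  n-1-i ≥ 0 always, so the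
-- Int exponent is written with .toNat (exact here).
def sorted_domains_combo_alt (dom_list : List String) : List String :=
  ((PySem.List.pyRange 1 ((2 : Int) ^ dom_list.length) 1).reverse).map (fun mask =>
    PySem.Str.join "$"
      (((PySem.List.enumerate dom_list).filter
          (fun p => (PySem.Int.mod
              (PySem.Int.floordiv mask
                ((2 : Int) ^ (((dom_list.length : Int) - 1 - p.1).toNat))) 2) != 0)).map
        (fun p => p.2)))

-- ===== PRECONDITION & SPEC =====
-- A raises IndexError on the empty list; nothing else is excluded.
def Pre_sorted_domains_combo (dom_list : List String) : Prop := dom_list ≠ []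
instance (dom_list : List String) : Decidable (Pre_sorted_domains_combo dom_list) := by
  unfold Pre_sorted_domains_combo; infer_instance

def pvWitness_sorted_domains_combo : List String := ["a", "b", "c"]

def Spec_sorted_domains_combo (dom_list : List String) (out : List String) : Prop :=
  out = sorted_domains_combo_alt dom_list
instance (dom_list : List String) (out : List String) : Decidable (Spec_sorted_domains_combo dom_list out) := by
  unfold Spec_sorted_domains_combo; infer_instance

-- ===== CLAIM (what is proved, stated in full; the proofs are below) =====
def Claim_equal_sorted_domains_combo : Prop := ∀ (dom_list : List String), Dom_sorted_domains_combo dom_list → Pre_sorted_domains_combo dom_list → Spec_sorted_domains_combo dom_list (sorted_domains_combo dom_list)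

-- ===== LEMMAS AND PROOFS =====

-- selRow xs m: the sub-list of xs selected by the binary digits of m (head ↔ highest bit).
def selRow (xs : List String) (m : Nat) : List String :=
  match xs with
  | [] => []
  | x :: rest => (if Nat.testBit m rest.length then [x] else []) ++ selRow rest m

-- natDesc g M = [g M, g (M-1), …, g 1]
def natDesc (g : Nat → String) : Nat → List String
  | 0 => []
  | m + 1 => g (m + 1) :: natDesc g m

theorem natDesc_congr (g h : Nat → String) (hgh : ∀ m, g m = h m) :
    ∀ M, natDesc g M = natDesc h M := by
  intro M; induction M with
  | zero => rfl
  | succ m ih => simp [natDesc, hgh, ih]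

theorem map_rev_pyRange (M : Nat) (f : Int → String) :
    ((PySem.List.pyRange 1 ((M : Int) + 1) 1).reverse).map f
      = natDesc (fun m => f (m : Int)) M := by
  induction M with
  | zero => simp [PySem.List.pyRange_one_eq_nil, natDesc]
  | succ m ih =>
    have h : (1 : Int) ≤ (m : Int) + 1 := by omega
    rw [show ((m + 1 : Nat) : Int) + 1 = ((m : Int) + 1) + 1 by push_cast; ring,
        PySem.List.pyRange_one_succ_right h, List.reverse_append, List.reverse_cons,
        List.reverse_nil, List.nil_append, List.singleton_append, List.map_cons, ih]
    simp only [natDesc, Nat.cast_add, Nat.cast_one]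

-- the inner generator of B equals selRow
theorem bridge (xs : List String) : ∀ (s n : Int) (m : Nat), 0 ≤ s → n = s + xs.length →
    (((PySem.List.enumerate xs s).filter
        (fun p => (PySem.Int.mod
            (PySem.Int.floordiv ((m : Nat) : Int)
              ((2 : Int) ^ ((n - 1 - p.1).toNat))) 2) != 0)).map (fun p => p.2))
      = selRow xs m := by
  induction xs with
  | nil => intro s n m _ _; simp [PySem.List.enumerate_nil, selRow]
  | cons x rest ih =>
    intro s n m hs hn
    have hlen : (n - 1 - s).toNat = rest.length := by
      have h : n - 1 - s = (rest.length : Int) := by simp [hn]; ring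
      omega
    have hcond : (PySem.Int.mod (PySem.Int.floordiv ((m : Nat) : Int)
        ((2 : Int) ^ rest.length)) 2 != 0) = Nat.testBit m rest.length := by
      have h2 : ((2 : Int) ^ rest.length) = ((2 ^ rest.length : Nat) : Int) := by push_cast; ring
      rw [h2, PySem.Int.floordiv_natCast,
        show (2 : Int) = ((2 : Nat) : Int) by norm_num, PySem.Int.mod_natCast,
        Nat.testBit_eq_decide_div_mod_eq]
      rcases Nat.mod_two_eq_zero_or_one (m / 2 ^ rest.length) with h | h <;> simp [h]
    rw [PySem.List.enumerate_cons]
    simp only [List.filter_cons]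
    rw [hlen, hcond]
    cases hb : Nat.testBit m rest.length
    · rw [if_neg (by simp)]
      rw [ih (s + 1) n m (by omega) (by simp [hn]; ring)]
      simp [selRow, hb]
    · rw [if_pos rfl, List.map_cons]
      rw [ih (s + 1) n m (by omega) (by simp [hn]; ring)]
      simp [selRow, hb]

theorem alt_eq_desc (xs : List String) :
    sorted_domains_combo_alt xs
      = natDesc (fun m => PySem.Str.join "$" (selRow xs m)) (2 ^ xs.length - 1) := by
  unfold sorted_domains_combo_alt
  have h2 : ((2 : Int) ^ xs.length) = ((2 ^ xs.length - 1 : Nat) : Int) + 1 := by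
    have : 1 ≤ 2 ^ xs.length := Nat.one_le_two_pow
    push_cast [this]; ring
  rw [h2, map_rev_pyRange]
  exact natDesc_congr _ _ (fun m => by
    rw [bridge xs 0 (xs.length : Int) m le_rfl (by ring)]) _

-- selRow ignores bits at or above xs.length when they agree
theorem selRow_congr (xs : List String) : ∀ m m' : Nat,
    (∀ k < xs.length, Nat.testBit m k = Nat.testBit m' k) → selRow xs m = selRow xs m' := by
  induction xs with
  | nil => intro m m' _; rfl
  | cons x rest ih =>
    intro m m' h
    simp only [selRow, h rest.length (by simp),
      ih m m' (fun k hk => h k (by simp; omega))]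

theorem selRow_zero (xs : List String) : selRow xs 0 = [] := by
  induction xs with
  | nil => rfl
  | cons x rest ih => simp [selRow, ih]

theorem selRow_add_pow (x : String) (rest : List String) (m : Nat) (hm : m < 2 ^ rest.length) :
    selRow (x :: rest) (2 ^ rest.length + m) = x :: selRow rest m := by
  have hb : Nat.testBit (2 ^ rest.length + m) rest.length = true := by
    rw [Nat.testBit_eq_decide_div_mod_eq]
    have : (2 ^ rest.length + m) / 2 ^ rest.length = 1 := by
      rw [Nat.add_div_left _ (by positivity), Nat.div_eq_of_lt hm]
    simp [this]
  have hlow : selRow rest (2 ^ rest.length + m) = selRow rest m := by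
    apply selRow_congr
    intro k hk
    rw [Nat.testBit_eq_decide_div_mod_eq, Nat.testBit_eq_decide_div_mod_eq]
    have hpow : 2 ^ rest.length / 2 ^ k = 2 ^ (rest.length - k) := by
      rw [Nat.pow_div (by omega) (by norm_num)]
    have hdvd : (2 ^ k) ∣ 2 ^ rest.length := pow_dvd_pow 2 (by omega)
    have hsplit : (2 ^ rest.length + m) / 2 ^ k = 2 ^ (rest.length - k) + m / 2 ^ k := by
      rw [Nat.add_div_of_dvd_right hdvd, hpow]
    rw [hsplit]
    have h0 : 2 ^ (rest.length - k) % 2 = 0 := by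
      have hne : rest.length - k ≠ 0 := by omega
      rcases Nat.exists_eq_succ_of_ne_zero hne with ⟨j, hj⟩
      simp [hj, pow_succ, Nat.mul_mod_left]
    have heq : (2 ^ (rest.length - k) + m / 2 ^ k) % 2 = m / 2 ^ k % 2 := by omega
    rw [heq]
  simp [selRow, hb, hlow]

theorem selRow_low (x : String) (rest : List String) (m : Nat) (hm : m < 2 ^ rest.length) :
    selRow (x :: rest) m = selRow rest m := by
  have hb : Nat.testBit m rest.length = false := by
    rw [Nat.testBit_eq_decide_div_mod_eq]
    simp [Nat.div_eq_of_lt hm]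
  simp [selRow, hb]

theorem selRow_ne_nil (xs : List String) : ∀ m : Nat, 1 ≤ m → m < 2 ^ xs.length →
    selRow xs m ≠ [] := by
  induction xs with
  | nil => intro m h1 h2; simp at h2; omega
  | cons x rest ih =>
    intro m h1 h2
    by_cases hm : m < 2 ^ rest.length
    · rw [selRow_low x rest m hm]; exact ih m h1 hm
    · have hle : 2 ^ rest.length ≤ m := by omega
      have h2' : m < 2 ^ rest.length * 2 := by
        have h := h2
        simp only [List.length_cons, pow_succ] at h
        omega
      have hdiv : m / 2 ^ rest.length = 1 := by
        apply Nat.div_eq_of_lt_le <;> omega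
      have hb : Nat.testBit m rest.length = true := by
        rw [Nat.testBit_eq_decide_div_mod_eq, hdiv]
        decide
      simp [selRow, hb]

theorem join_cons_ne (x : String) (l : List String) (h : l ≠ []) :
    PySem.Str.join "$" (x :: l) = x ++ "$" ++ PySem.Str.join "$" l := by
  rcases List.exists_cons_of_ne_nil h with ⟨y, t, rfl⟩
  rw [← String.toList_inj]
  simp [PySem.Str.toList_join, PySem.Chars.join_cons_cons]

theorem join_singleton (x : String) : PySem.Str.join "$" [x] = x := by
  rw [← String.toList_inj]
  simp [PySem.Str.toList_join, PySem.Chars.join_singleton]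

-- low part of the countdown: masks below 2^rest.length never include x
theorem desc_low (x : String) (rest : List String) : ∀ m : Nat, m < 2 ^ rest.length →
    natDesc (fun m => PySem.Str.join "$" (selRow (x :: rest) m)) m
      = natDesc (fun m => PySem.Str.join "$" (selRow rest m)) m := by
  intro m
  induction m with
  | zero => intro _; rfl
  | succ m ih =>
    intro h
    simp only [natDesc, selRow_low x rest (m + 1) h, ih (by omega)]

-- high part: masks 2^n … 2^n + m prepend x (with "$" when the low bits are nonzero)
theorem desc_high (x : String) (rest : List String) : ∀ m : Nat, m < 2 ^ rest.length →
    natDesc (fun m => PySem.Str.join "$" (selRow (x :: rest) m)) (2 ^ rest.length + m)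
      = ((natDesc (fun m => PySem.Str.join "$" (selRow rest m)) m).map
          (fun c => x ++ "$" ++ c)) ++ [x]
        ++ natDesc (fun m => PySem.Str.join "$" (selRow rest m)) (2 ^ rest.length - 1) := by
  intro m
  induction m with
  | zero =>
    intro _
    have h1 : 1 ≤ 2 ^ rest.length := Nat.one_le_two_pow
    have : 2 ^ rest.length + 0 = (2 ^ rest.length - 1) + 1 := by omega
    rw [this]
    simp only [natDesc, List.map_nil, List.nil_append]
    rw [show (2 ^ rest.length - 1) + 1 = 2 ^ rest.length + 0 by omega,
      selRow_add_pow x rest 0 (by positivity), selRow_zero, join_singleton]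
    rw [desc_low x rest (2 ^ rest.length - 1) (by omega)]
    rfl
  | succ m ih =>
    intro h
    have hm : m < 2 ^ rest.length := by omega
    rw [show 2 ^ rest.length + (m + 1) = (2 ^ rest.length + m) + 1 by ring]
    simp only [natDesc]
    rw [show (2 ^ rest.length + m) + 1 = 2 ^ rest.length + (m + 1) by ring,
      selRow_add_pow x rest (m + 1) h,
      join_cons_ne x _ (selRow_ne_nil rest (m + 1) (by omega) h),
      ih hm]
    simp

theorem eq_nonempty : ∀ xs : List String, xs ≠ [] →
    sorted_domains_combo xs = sorted_domains_combo_alt xs := by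
  intro xs
  induction xs with
  | nil => intro h; exact absurd rfl h
  | cons x ys ih =>
    intro _
    rw [alt_eq_desc]
    cases ys with
    | nil =>
      simp [sorted_domains_combo, natDesc, selRow, join_singleton]
    | cons y zs =>
      have hne : (y :: zs) ≠ [] := by simp
      have h1 : 1 ≤ 2 ^ (y :: zs).length := Nat.one_le_two_pow
      have hsplit : 2 ^ (x :: y :: zs).length - 1
          = 2 ^ (y :: zs).length + (2 ^ (y :: zs).length - 1) := by
        simp only [List.length_cons]
        rw [pow_succ]; omega
      rw [hsplit, desc_high x (y :: zs) (2 ^ (y :: zs).length - 1) (by omega)]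
      rw [← alt_eq_desc, ← ih hne]
      simp [sorted_domains_combo]

-- ===== VERDICT (by name: the statement is the Claim_ definition above) =====
theorem sorted_domains_combo_spec : Claim_equal_sorted_domains_combo := by
  intro xs _ hpre
  exact eq_nonempty xs hpre
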